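-- pv_equiv track=rewrite | github.com/Rageemon/optiai | adaptive-logic-engine/app/core/patch_applier.py | _resolve_teacher_ref
-- ===== SOURCE A (Python) =====
-- from typing import Any, Dict, List, Tuple, Optional
--
-- def _resolve_teacher_ref(teachers: List[Dict[str, Any]], ref: str) -> Optional[Dict[str, Any]]:
--     ref_norm = (ref or "").strip().lower()
--     if not ref_norm:
--         return None
--
--     for t in teachers:
--         if str(t.get("name", "")).strip().lower() == ref_norm:
--             return t
--
--     if ref_norm.endswith(" teacher"):
--         subj = ref_norm[:-8].strip()
--         if subj:
--             matches: List[Dict[str, Any]] = []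
--             for t in teachers:
--                 subjects = [s.strip().lower() for s in str(t.get("subjects", "")).split(",") if s.strip()]
--                 if subj in subjects:
--                     matches.append(t)
--             if len(matches) == 1:
--                 return matches[0]
--
--     return None
-- ===== SOURCE B (Python) =====
-- from typing import Any, Dict, List, Optional
--
--
-- def _resolve_teacher_ref(teachers: List[Dict[str, Any]], ref: str) -> Optional[Dict[str, Any]]:
--     ref_norm = (ref or "").strip().lower()
--     if not ref_norm:
--         return None
--
--     # Build both indexes in one pass: first-wins name index, subject -> teachers index.
--     by_name: Dict[str, Dict[str, Any]] = {}
--     by_subject: Dict[str, List[Dict[str, Any]]] = {}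
--     for t in teachers:
--         by_name.setdefault(str(t.get("name", "")).strip().lower(), t)
--         parsed = {s.strip().lower() for s in str(t.get("subjects", "")).split(",") if s.strip()}
--         for s in parsed:
--             by_subject.setdefault(s, []).append(t)
--
--     if ref_norm in by_name:
--         return by_name[ref_norm]
--
--     if ref_norm.endswith(" teacher"):
--         cands = by_subject.get(ref_norm[:-8].strip(), [])
--         if len(cands) == 1:
--             return cands[0]
--     return None
-- ===== Notes on version B (the rewrite author's own statement) =====
-- stated objective: alternative
-- what changed: A scans the teacher list twice (a name scan, then a subject-filter scan); B makes one pass that builds a first-wins name index and a subject->teachers index and then answers by two dictionary lookups.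
import Mathlib
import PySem

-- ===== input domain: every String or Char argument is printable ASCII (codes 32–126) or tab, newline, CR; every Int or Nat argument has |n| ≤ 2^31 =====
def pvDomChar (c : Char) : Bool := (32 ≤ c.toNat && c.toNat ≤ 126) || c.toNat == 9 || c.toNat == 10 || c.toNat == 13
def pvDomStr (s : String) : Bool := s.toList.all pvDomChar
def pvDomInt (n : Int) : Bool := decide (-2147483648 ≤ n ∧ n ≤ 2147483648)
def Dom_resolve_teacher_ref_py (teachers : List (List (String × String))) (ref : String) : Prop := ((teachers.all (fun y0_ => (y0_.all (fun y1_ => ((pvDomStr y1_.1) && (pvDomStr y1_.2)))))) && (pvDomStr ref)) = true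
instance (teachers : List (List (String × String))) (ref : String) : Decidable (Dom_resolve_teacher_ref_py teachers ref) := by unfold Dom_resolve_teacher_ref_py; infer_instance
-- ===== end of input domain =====

-- B replaces A's two scans of `teachers` by a single pass that builds a first-wins name index and a
-- subject → teachers index, then answers by dictionary lookup (objective: alternative decomposition).

-- shared normalization helpers (identical subexpressions of both Pythons)
def pvNorm (s : String) : String := PySem.Str.lower (PySem.Str.strip s)

def pvNameKey (t : List (String × String)) : String :=
  pvNorm ((PySem.Dict.ofList t).getD "name" "")

-- [s.strip().lower() for s in str(t.get("subjects","")).split(",") if s.strip()]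
-- split? is some here since "," ≠ ""; .getD [] is the unreachable none arm
def pvSubjectsList (t : List (String × String)) : List String :=
  ((((PySem.Str.split? ((PySem.Dict.ofList t).getD "subjects" "") ",").getD []).filter
      (fun s => !(PySem.Str.strip s == ""))).map pvNorm)

-- ===== PORT A =====
-- A's first loop: return the first teacher whose normalized name equals ref_norm
def pvFindByName (teachers : List (List (String × String))) (refNorm : String) :
    Option (List (String × String)) :=
  match teachers with
  | [] => none
  | t :: rest => if pvNameKey t = refNorm then some t else pvFindByName rest refNorm

-- A's second loop: matches.append(t) whenever subj in subjects
def pvCollect (teachers : List (List (String × String))) (subj : String) :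
    List (List (String × String)) :=
  teachers.foldl (fun acc t => if (pvSubjectsList t).contains subj then acc ++ [t] else acc) []

def resolve_teacher_ref_py (teachers : List (List (String × String))) (ref : String) :
    Option (List (String × String)) :=
  let refNorm := pvNorm ref
  if refNorm = "" then none
  else
    match pvFindByName teachers refNorm with
    | some t => some t
    | none =>
      if PySem.Str.endswith refNorm " teacher" then
        let subj := PySem.Str.strip (PySem.Str.slice refNorm none (some (-8)))
        if subj = "" then none
        else
          let ms := pvCollect teachers subj
          if ms.length = 1 then PySem.List.pyGet? ms 0 else none
      else none

-- ===== PORT B =====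
-- one pass: by_name.setdefault(name, t); for s in parsed-set: by_subject.setdefault(s, []).append(t)
def pvBuild (teachers : List (List (String × String))) :
    PySem.Dict String (List (String × String)) ×
    PySem.Dict String (List (List (String × String))) :=
  teachers.foldl
    (fun acc t =>
      (acc.1.setdefault (pvNameKey t) t,
       (PySem.Set.ofList (pvSubjectsList t)).foldl
         (fun d s => d.modify s [] (fun l => l ++ [t])) acc.2))
    (PySem.Dict.empty, PySem.Dict.empty)

def resolve_teacher_ref_py_alt (teachers : List (List (String × String))) (ref : String) :
    Option (List (String × String)) :=
  let refNorm := pvNorm ref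
  if refNorm = "" then none
  else
    let idx := pvBuild teachers
    match idx.1.get? refNorm with
    | some t => some t
    | none =>
      if PySem.Str.endswith refNorm " teacher" then
        let cands := idx.2.getD (PySem.Str.strip (PySem.Str.slice refNorm none (some (-8)))) []
        if cands.length = 1 then PySem.List.pyGet? cands 0 else none
      else none

-- ===== PRECONDITION & SPEC =====
def Spec_resolve_teacher_ref_py (teachers : List (List (String × String))) (ref : String) (out : Option (List (String × String))) : Prop := out = resolve_teacher_ref_py_alt teachers ref
instance (teachers : List (List (String × String))) (ref : String) (out : Option (List (String × String))) : Decidable (Spec_resolve_teacher_ref_py teachers ref out) := by unfold Spec_resolve_teacher_ref_py; infer_instance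

-- ===== CLAIM (what is proved, stated in full; the proofs are below) =====
def Claim_equal_resolve_teacher_ref_py : Prop := ∀ (teachers : List (List (String × String))) (ref : String), Dom_resolve_teacher_ref_py teachers ref → Spec_resolve_teacher_ref_py teachers ref (resolve_teacher_ref_py teachers ref)

-- ===== LEMMAS AND PROOFS =====

-- setdefault read back: first occupant wins
theorem pvGet?_setdefault (d : PySem.Dict String (List (String × String)))
    (k k' : String) (v : List (String × String)) :
    (d.setdefault k v).get? k' = (d.get? k').or (if k = k' then some v else none) := by
  have hins : ¬ d.contains k = true → d.setdefault k v = d.insert k v := by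
    intro hc
    apply PySem.Dict.ext
    rw [PySem.Dict.items_insert_of_not_contains (h := by simpa using hc)]
    simp [PySem.Dict.setdefault, hc]
  by_cases hc : d.contains k = true
  · simp only [PySem.Dict.setdefault, hc, if_true]
    by_cases hk : k = k'
    · subst hk
      rw [PySem.Dict.contains_eq_isSome_get?] at hc
      cases hg : d.get? k with
      | none => rw [hg] at hc; simp at hc
      | some w => simp [Option.or]
    · simp [hk]
  · rw [hins hc, PySem.Dict.get?_insert]
    by_cases hk : k' = k
    · subst hk
      rw [PySem.Dict.contains_eq_isSome_get?] at hc
      cases hg : d.get? k' with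
      | none => simp [Option.or]
      | some w => rw [hg] at hc; simp at hc
    · simp [hk, Ne.symm hk]

-- the name index answers exactly A's first loop (first-wins setdefault)
theorem pvBuild_name_get? (teachers : List (List (String × String))) (refNorm : String)
    (dn : PySem.Dict String (List (String × String)))
    (ds : PySem.Dict String (List (List (String × String)))) :
    ((teachers.foldl
      (fun acc t =>
        (acc.1.setdefault (pvNameKey t) t,
         (PySem.Set.ofList (pvSubjectsList t)).foldl
           (fun d s => d.modify s [] (fun l => l ++ [t])) acc.2))
      (dn, ds)).1).get? refNorm
      = (dn.get? refNorm).or (pvFindByName teachers refNorm) := by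
  induction teachers generalizing dn ds with
  | nil => simp [pvFindByName]
  | cons t rest ih =>
    simp only [List.foldl_cons, pvFindByName]
    rw [ih, pvGet?_setdefault, Option.or_assoc]
    have hin : ((if pvNameKey t = refNorm then some t else none).or (pvFindByName rest refNorm))
        = (if pvNameKey t = refNorm then some t else pvFindByName rest refNorm) := by
      by_cases hk : pvNameKey t = refNorm <;> simp [hk]
    rw [hin]

-- a fold over subjects not containing `subj` leaves the key `subj` alone
theorem pvSubjFold_getD_of_not_mem (ss : List String) (subj : String)
    (t : List (String × String))
    (d : PySem.Dict String (List (List (String × String))))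
    (h : subj ∉ ss) :
    (ss.foldl (fun d s => d.modify s [] (fun l => l ++ [t])) d).getD subj []
      = d.getD subj [] := by
  induction ss generalizing d with
  | nil => rfl
  | cons s rest ih =>
    simp only [List.mem_cons, not_or] at h
    simp only [List.foldl_cons]
    rw [ih _ h.2, PySem.Dict.getD_modify, if_neg h.1]

-- a per-teacher subject fold appends t exactly once at each of its (distinct) subjects
theorem pvSubjFold_getD (ss : List String) (subj : String)
    (t : List (String × String))
    (d : PySem.Dict String (List (List (String × String))))
    (hnd : ss.Nodup) :
    (ss.foldl (fun d s => d.modify s [] (fun l => l ++ [t])) d).getD subj []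
      = d.getD subj [] ++ (if subj ∈ ss then [t] else []) := by
  induction ss generalizing d with
  | nil => simp
  | cons s rest ih =>
    rcases List.nodup_cons.mp hnd with ⟨hs, hrest⟩
    simp only [List.foldl_cons]
    by_cases hmem : subj = s
    · subst hmem
      rw [pvSubjFold_getD_of_not_mem _ _ _ _ hs]
      simp
    · rw [ih _ hrest, PySem.Dict.getD_modify, if_neg hmem]
      simp [List.mem_cons, hmem]

-- the subject index answers exactly A's filter
theorem pvBuild_subj_getD (teachers : List (List (String × String))) (subj : String)
    (dn : PySem.Dict String (List (String × String)))
    (ds : PySem.Dict String (List (List (String × String)))) :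
    ((teachers.foldl
      (fun acc t =>
        (acc.1.setdefault (pvNameKey t) t,
         (PySem.Set.ofList (pvSubjectsList t)).foldl
           (fun d s => d.modify s [] (fun l => l ++ [t])) acc.2))
      (dn, ds)).2).getD subj []
      = ds.getD subj [] ++ teachers.filter (fun t => (pvSubjectsList t).contains subj) := by
  induction teachers generalizing dn ds with
  | nil => simp
  | cons t rest ih =>
    simp only [List.foldl_cons, ih, List.filter_cons]
    rw [pvSubjFold_getD _ _ _ _ (PySem.Set.nodup_ofList _)]
    by_cases hmem : subj ∈ pvSubjectsList t
    · simp [PySem.Set.mem_ofList, hmem]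
    · simp [PySem.Set.mem_ofList, hmem]

-- A's collecting loop is a filter
theorem pvCollect_eq_filter (teachers : List (List (String × String))) (subj : String) :
    pvCollect teachers subj = teachers.filter (fun t => (pvSubjectsList t).contains subj) := by
  have h := PySem.List.foldl_append_if
    (fun t => (pvSubjectsList t).contains subj) (fun t => t) teachers []
  simpa [pvCollect] using h

-- lower preserves nonemptiness
theorem pvNorm_ne_empty (s : String) (h : ¬ PySem.Str.strip s = "") : ¬ pvNorm s = "" := by
  intro hlow
  apply h
  have h2 := congrArg String.toList hlow
  simp only [pvNorm, PySem.Str.toList_lower, PySem.Chars.lower] at h2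
  have h3 : (PySem.Str.strip s).toList = ("" : String).toList := by simpa using h2
  exact String.toList_inj.mp h3

-- every parsed subject is nonempty, so the key "" never matches
theorem pvSubjects_ne_empty (t : List (String × String)) : "" ∉ pvSubjectsList t := by
  intro hmem
  unfold pvSubjectsList at hmem
  rw [List.mem_map] at hmem
  obtain ⟨s, hs, habs⟩ := hmem
  rw [List.mem_filter] at hs
  have hne : ¬ PySem.Str.strip s = "" := by
    have := hs.2
    simp only [Bool.not_eq_eq_eq_not, Bool.not_true, beq_eq_false_iff_ne, ne_eq] at this
    exact this
  exact pvNorm_ne_empty s hne habs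

-- ===== VERDICT (by name: the statement is the Claim_ definition above) =====
theorem resolve_teacher_ref_py_spec : Claim_equal_resolve_teacher_ref_py := by
  intro teachers ref _
  unfold Spec_resolve_teacher_ref_py resolve_teacher_ref_py resolve_teacher_ref_py_alt
  set refNorm := pvNorm ref with hrn
  by_cases h0 : refNorm = ""
  · simp [h0]
  · simp only [if_neg h0]
    rw [show (pvBuild teachers).1.get? refNorm
        = (PySem.Dict.empty.get? refNorm).or (pvFindByName teachers refNorm) from
          pvBuild_name_get? teachers refNorm _ _]
    simp only [PySem.Dict.get?_empty, Option.or]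
    cases hf : pvFindByName teachers refNorm with
    | some t => rfl
    | none =>
      by_cases hend : PySem.Str.endswith refNorm " teacher"
      · simp only [hend, if_true]
        set subj := PySem.Str.strip (PySem.Str.slice refNorm none (some (-8))) with hsubj
        rw [show (pvBuild teachers).2.getD subj []
            = PySem.Dict.empty.getD subj []
                ++ teachers.filter (fun t => (pvSubjectsList t).contains subj) from
              pvBuild_subj_getD teachers subj _ _]
        simp only [PySem.Dict.getD_empty, List.nil_append]
        by_cases hse : subj = ""
        · have hfil : (teachers.filter (fun t => (pvSubjectsList t).contains subj)) = [] := by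
            apply List.filter_eq_nil_iff.mpr
            intro t _
            rw [hse]
            simpa [List.contains_iff_mem] using pvSubjects_ne_empty t
          rw [if_pos hse, hfil]
          simp
        · rw [if_neg hse, pvCollect_eq_filter]
      · rw [if_neg hend, if_neg hend]
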